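-- pv_equiv track=rewrite | github.com/Yogeshwari155/Workshop | utils.py | validate_chart_config
-- ===== SOURCE A (Python) =====
-- from typing import Union, Dict, Any
--
-- def validate_chart_config(config: Dict[str, Any]) -> Dict[str, str]:
--     """
--     Validate chart configuration and return any errors.
--
--     Args:
--         config: Chart configuration dictionary
--
--     Returns:
--         Dictionary of validation errors
--     """
--     errors = {}
--
--     required_fields = ['chart_type']
--     for field in required_fields:
--         if field not in config:
--             errors[field] = f"{field} is required"
--
--     # Validate chart type
--     valid_chart_types = [
--         "Scatter Plot", "Line Chart", "Bar Chart",
--         "Histogram", "Box Plot", "Heatmap", "Pie Chart"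
--     ]
--
--     if 'chart_type' in config and config['chart_type'] not in valid_chart_types:
--         errors['chart_type'] = f"Invalid chart type. Must be one of: {', '.join(valid_chart_types)}"
--
--     # Chart-specific validations
--     chart_type = config.get('chart_type')
--
--     if chart_type in ["Scatter Plot", "Line Chart"]:
--         if 'x_col' not in config or 'y_col' not in config:
--             errors['axes'] = "Both x_col and y_col are required for scatter plots and line charts"
--
--     elif chart_type == "Bar Chart":
--         if 'x_col' not in config or 'y_col' not in config:
--             errors['axes'] = "Both x_col and y_col are required for bar charts"
--
--     elif chart_type == "Histogram":
--         if 'x_col' not in config: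
--             errors['x_col'] = "x_col is required for histograms"
--
--     elif chart_type == "Box Plot":
--         if 'y_col' not in config:
--             errors['y_col'] = "y_col is required for box plots"
--
--     elif chart_type == "Pie Chart":
--         if 'values_col' not in config or 'names_col' not in config:
--             errors['pie_cols'] = "Both values_col and names_col are required for pie charts"
--
--     elif chart_type == "Heatmap":
--         if 'selected_cols' not in config:
--             errors['selected_cols'] = "selected_cols is required for heatmaps"
--
--     return errors
-- ===== SOURCE B (Python) =====
-- def validate_chart_config(config):
--     """Table-driven re-implementation: one lookup table replaces the if/elif ladder."""
--     errors = {}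
--
--     for field in ['chart_type']:
--         if field not in config:
--             errors[field] = f"{field} is required"
--
--     valid_chart_types = [
--         "Scatter Plot", "Line Chart", "Bar Chart",
--         "Histogram", "Box Plot", "Heatmap", "Pie Chart"
--     ]
--
--     if 'chart_type' in config and config['chart_type'] not in valid_chart_types:
--         errors['chart_type'] = f"Invalid chart type. Must be one of: {', '.join(valid_chart_types)}"
--
--     _AXES_SCATTER = "Both x_col and y_col are required for scatter plots and line charts"
--     REQUIREMENTS = {
--         "Scatter Plot": (["x_col", "y_col"], "axes", _AXES_SCATTER),
--         "Line Chart": (["x_col", "y_col"], "axes", _AXES_SCATTER),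
--         "Bar Chart": (["x_col", "y_col"], "axes", "Both x_col and y_col are required for bar charts"),
--         "Histogram": (["x_col"], "x_col", "x_col is required for histograms"),
--         "Box Plot": (["y_col"], "y_col", "y_col is required for box plots"),
--         "Pie Chart": (["values_col", "names_col"], "pie_cols", "Both values_col and names_col are required for pie charts"),
--         "Heatmap": (["selected_cols"], "selected_cols", "selected_cols is required for heatmaps"),
--     }
--
--     entry = REQUIREMENTS.get(config.get('chart_type'))
--     if entry is not None:
--         cols, key, msg = entry
--         if any(c not in config for c in cols):
--             errors[key] = msg
--
--     return errors
-- ===== Notes on version B (the rewrite author's own statement) =====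
-- stated objective: simpler
-- what changed: The per-chart-type if/elif ladder is replaced by a single lookup table mapping each chart type to (required columns, error key, message) and one uniform missing-column check.
import Mathlib
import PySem

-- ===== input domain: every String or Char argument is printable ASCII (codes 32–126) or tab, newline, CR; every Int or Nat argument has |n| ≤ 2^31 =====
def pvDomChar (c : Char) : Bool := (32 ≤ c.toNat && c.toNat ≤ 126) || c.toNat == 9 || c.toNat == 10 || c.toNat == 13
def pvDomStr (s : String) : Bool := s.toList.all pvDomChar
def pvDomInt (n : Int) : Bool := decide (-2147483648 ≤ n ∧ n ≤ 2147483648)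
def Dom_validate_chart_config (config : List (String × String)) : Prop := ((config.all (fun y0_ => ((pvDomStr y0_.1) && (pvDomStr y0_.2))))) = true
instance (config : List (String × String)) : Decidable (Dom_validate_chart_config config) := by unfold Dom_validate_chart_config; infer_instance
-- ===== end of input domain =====

-- B replaces A's per-chart-type if/elif ladder by one lookup table of (required columns, error key, message); objective: simpler.

-- ===== PORT A =====
-- the valid_chart_types list of A
def vccValid : List String :=
  ["Scatter Plot", "Line Chart", "Bar Chart", "Histogram", "Box Plot", "Heatmap", "Pie Chart"]

def validate_chart_config (config : List (String × String)) : List (String × String) :=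
  let errors : PySem.Dict String String := PySem.Dict.empty
  -- for field in required_fields: if field not in config: errors[field] = f"{field} is required"
  let errors := ["chart_type"].foldl (fun e field =>
      if (config.lookup field).isSome then e
      else e.insert field (field ++ " is required")) errors
  -- if 'chart_type' in config and config['chart_type'] not in valid_chart_types:
  let errors :=
    match config.lookup "chart_type" with
    | some v =>
        if vccValid.contains v then errors
        else errors.insert "chart_type" ("Invalid chart type. Must be one of: " ++ String.intercalate ", " vccValid)
    | none => errors
  -- chart_type = config.get('chart_type'); the if/elif ladder
  let ct := config.lookup "chart_type"
  let errors :=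
    if ct = some "Scatter Plot" ∨ ct = some "Line Chart" then
      if (config.lookup "x_col").isNone || (config.lookup "y_col").isNone then
        errors.insert "axes" "Both x_col and y_col are required for scatter plots and line charts"
      else errors
    else if ct = some "Bar Chart" then
      if (config.lookup "x_col").isNone || (config.lookup "y_col").isNone then
        errors.insert "axes" "Both x_col and y_col are required for bar charts"
      else errors
    else if ct = some "Histogram" then
      if (config.lookup "x_col").isNone then
        errors.insert "x_col" "x_col is required for histograms"
      else errors
    else if ct = some "Box Plot" then
      if (config.lookup "y_col").isNone then
        errors.insert "y_col" "y_col is required for box plots"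
      else errors
    else if ct = some "Pie Chart" then
      if (config.lookup "values_col").isNone || (config.lookup "names_col").isNone then
        errors.insert "pie_cols" "Both values_col and names_col are required for pie charts"
      else errors
    else if ct = some "Heatmap" then
      if (config.lookup "selected_cols").isNone then
        errors.insert "selected_cols" "selected_cols is required for heatmaps"
      else errors
    else errors
  errors.items

-- ===== PORT B =====
-- B's lookup table: chart type ↦ (required columns, error key, error message)
def vccTable : List (String × (List String × String × String)) :=
  [("Scatter Plot", (["x_col", "y_col"], "axes", "Both x_col and y_col are required for scatter plots and line charts")),
   ("Line Chart", (["x_col", "y_col"], "axes", "Both x_col and y_col are required for scatter plots and line charts")),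
   ("Bar Chart", (["x_col", "y_col"], "axes", "Both x_col and y_col are required for bar charts")),
   ("Histogram", (["x_col"], "x_col", "x_col is required for histograms")),
   ("Box Plot", (["y_col"], "y_col", "y_col is required for box plots")),
   ("Pie Chart", (["values_col", "names_col"], "pie_cols", "Both values_col and names_col are required for pie charts")),
   ("Heatmap", (["selected_cols"], "selected_cols", "selected_cols is required for heatmaps"))]

def validate_chart_config_alt (config : List (String × String)) : List (String × String) :=
  let errors : PySem.Dict String String := PySem.Dict.empty
  let errors := ["chart_type"].foldl (fun e field =>
      if (config.lookup field).isSome then e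
      else e.insert field (field ++ " is required")) errors
  let errors :=
    match config.lookup "chart_type" with
    | some v =>
        if vccValid.contains v then errors
        else errors.insert "chart_type" ("Invalid chart type. Must be one of: " ++ String.intercalate ", " vccValid)
    | none => errors
  -- entry = REQUIREMENTS.get(config.get('chart_type')); uniform missing-column check
  let errors :=
    match (config.lookup "chart_type").bind (fun v => vccTable.lookup v) with
    | some (cols, key, msg) =>
        if cols.any (fun c => (config.lookup c).isNone) then errors.insert key msg else errors
    | none => errors
  errors.items

-- ===== PRECONDITION & SPEC =====
def Spec_validate_chart_config (config : List (String × String)) (out : List (String × String)) : Prop := out = validate_chart_config_alt config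
instance (config : List (String × String)) (out : List (String × String)) : Decidable (Spec_validate_chart_config config out) := by unfold Spec_validate_chart_config; infer_instance

-- ===== CLAIM (what is proved, stated in full; the proofs are below) =====
def Claim_equal_validate_chart_config : Prop := ∀ (config : List (String × String)), Dom_validate_chart_config config → Spec_validate_chart_config config (validate_chart_config config)

-- ===== LEMMAS AND PROOFS =====

-- ===== VERDICT (by name: the statement is the Claim_ definition above) =====
theorem validate_chart_config_spec : Claim_equal_validate_chart_config := by
  intro config _
  unfold Spec_validate_chart_config validate_chart_config validate_chart_config_alt
  cases h : config.lookup "chart_type" with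
  | none => simp [h]
  | some v =>
    by_cases h1 : v = "Scatter Plot"
    · subst h1
      cases hx : List.lookup "x_col" config <;> cases hy : List.lookup "y_col" config <;>
        simp [h, hx, hy, vccValid, vccTable, List.lookup]
    by_cases h2 : v = "Line Chart"
    · subst h2
      cases hx : List.lookup "x_col" config <;> cases hy : List.lookup "y_col" config <;>
        simp [h, hx, hy, vccValid, vccTable, List.lookup]
    by_cases h3 : v = "Bar Chart"
    · subst h3
      cases hx : List.lookup "x_col" config <;> cases hy : List.lookup "y_col" config <;>
        simp [h, hx, hy, vccValid, vccTable, List.lookup]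
    by_cases h4 : v = "Histogram"
    · subst h4
      cases hx : List.lookup "x_col" config <;> simp [h, hx, vccValid, vccTable, List.lookup]
    by_cases h5 : v = "Box Plot"
    · subst h5
      cases hy : List.lookup "y_col" config <;> simp [h, hy, vccValid, vccTable, List.lookup]
    by_cases h6 : v = "Pie Chart"
    · subst h6
      cases hv : List.lookup "values_col" config <;> cases hn : List.lookup "names_col" config <;>
        simp [h, hv, hn, vccValid, vccTable, List.lookup]
    by_cases h7 : v = "Heatmap"
    · subst h7
      cases hs : List.lookup "selected_cols" config <;> simp [h, hs, vccValid, vccTable, List.lookup]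
    · simp [h, vccValid, vccTable, List.lookup, h1, h2, h3, h4, h5, h6, h7,
        beq_eq_false_iff_ne.mpr h1, beq_eq_false_iff_ne.mpr h2, beq_eq_false_iff_ne.mpr h3,
        beq_eq_false_iff_ne.mpr h4, beq_eq_false_iff_ne.mpr h5, beq_eq_false_iff_ne.mpr h6,
        beq_eq_false_iff_ne.mpr h7]
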